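-- pv_equiv track=rewrite | github.com/SerhiiVolikov/SerhiiVolikov | Classwork/classwork 16.02/matrix.py | get_determinat
-- ===== SOURCE A (Python) =====
-- def get_determinat(the_matrix):
--     main_d = 1
--     secondary_d = 1
--     for row in range(len(the_matrix)):
--         for column in range(len(the_matrix[0])):
--             if row == column:
--                 main_d *= the_matrix[row][column]
--             if row + column == len(the_matrix) - 1:
--                 secondary_d *= the_matrix[row][column]
--     determinant = main_d - secondary_d
--     return determinant
-- ===== SOURCE B (Python) =====
-- def get_determinat(the_matrix):
--     n = len(the_matrix)
--     m = len(the_matrix[0]) if the_matrix else 0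
--     main_d = 1
--     for i in range(min(n, m)):
--         main_d *= the_matrix[i][i]
--     secondary_d = 1
--     for i in range(max(n - m, 0), n):
--         secondary_d *= the_matrix[i][n - 1 - i]
--     return main_d - secondary_d
-- ===== Notes on version B (the rewrite author's own statement) =====
-- stated objective: faster
-- what changed: Replaces A's nested row x column scan of every cell (testing the two diagonal conditions at each cell) with two independent single loops over closed-form index ranges that read only the diagonal entries; Pre_ excludes exactly the ragged matrices on which A raises IndexError.
import Mathlib
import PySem

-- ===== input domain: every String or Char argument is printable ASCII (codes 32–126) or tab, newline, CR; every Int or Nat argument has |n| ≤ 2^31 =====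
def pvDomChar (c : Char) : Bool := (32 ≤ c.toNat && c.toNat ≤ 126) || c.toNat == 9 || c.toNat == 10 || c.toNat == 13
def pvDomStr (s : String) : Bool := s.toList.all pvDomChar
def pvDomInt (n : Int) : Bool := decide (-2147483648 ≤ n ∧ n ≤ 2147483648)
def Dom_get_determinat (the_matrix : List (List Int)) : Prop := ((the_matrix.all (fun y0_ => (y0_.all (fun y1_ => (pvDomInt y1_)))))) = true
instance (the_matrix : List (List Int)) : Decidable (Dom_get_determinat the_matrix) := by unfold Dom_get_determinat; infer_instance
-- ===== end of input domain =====

-- B replaces A's nested scan of every cell with two single loops over closed-form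
-- diagonal index ranges (objective: faster).

-- ===== PORT A =====
-- Literal port of A's nested loops over range(len(M)) × range(len(M[0])).
-- Indices produced by range are nonnegative and Pre_ guarantees every access the
-- loop performs is in range, so pyGetD (total form of the_matrix[row][column],
-- exact under Pre_) is used; len(the_matrix[0]) is (pyGetD M 0 []).length, exact
-- whenever the inner loop runs (then the matrix is nonempty).
def get_determinat (the_matrix : List (List Int)) : Int :=
  let st := (PySem.List.pyRange 0 (the_matrix.length) 1).foldl
    (fun (st : Int × Int) row =>
      (PySem.List.pyRange 0 ((PySem.List.pyGetD the_matrix 0 []).length) 1).foldl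
        (fun st column =>
          let st1 := if row = column then
              (st.1 * PySem.List.pyGetD (PySem.List.pyGetD the_matrix row []) column 0, st.2)
            else st
          if row + column = (the_matrix.length : Int) - 1 then
              (st1.1, st1.2 * PySem.List.pyGetD (PySem.List.pyGetD the_matrix row []) column 0)
          else st1)
        st)
    (1, 1)
  st.1 - st.2

-- ===== PORT B =====
-- Literal port of Source B: m = len(M[0]) if M else 0, then one loop over
-- range(min(n, m)) for the main diagonal and one over range(max(n - m, 0), n)
-- for the anti-diagonal (indices nonnegative and, under Pre_, in range, so
-- pyGetD is exact).
def get_determinat_alt (the_matrix : List (List Int)) : Int :=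
  let n : Int := the_matrix.length
  let m : Int := if the_matrix = [] then 0 else ((PySem.List.pyGetD the_matrix 0 []).length : Int)
  let main_d := (PySem.List.pyRange 0 (min n m) 1).foldl
    (fun a i => a * PySem.List.pyGetD (PySem.List.pyGetD the_matrix i []) i 0) 1
  let secondary_d := (PySem.List.pyRange (max (n - m) 0) n 1).foldl
    (fun a i => a * PySem.List.pyGetD (PySem.List.pyGetD the_matrix i []) (n - 1 - i) 0) 1
  main_d - secondary_d

-- ===== PRECONDITION & SPEC =====
-- Pre_ excludes exactly the ragged matrices on which A raises IndexError: some row i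
-- shorter than a diagonal position (i or n-1-i) that the loop actually reads.
def Pre_get_determinat (the_matrix : List (List Int)) : Prop :=
  ∀ i < the_matrix.length,
    (i < (the_matrix.headD []).length → i < (the_matrix.getD i []).length) ∧
    (the_matrix.length - 1 - i < (the_matrix.headD []).length →
      the_matrix.length - 1 - i < (the_matrix.getD i []).length)
instance (the_matrix : List (List Int)) : Decidable (Pre_get_determinat the_matrix) := by
  unfold Pre_get_determinat; infer_instance
def pvWitness_get_determinat : List (List Int) := [[1, 2], [3, 4]]
def Spec_get_determinat (the_matrix : List (List Int)) (out : Int) : Prop := out = get_determinat_alt the_matrix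
instance (the_matrix : List (List Int)) (out : Int) : Decidable (Spec_get_determinat the_matrix out) := by unfold Spec_get_determinat; infer_instance

-- ===== CLAIM (what is proved, stated in full; the proofs are below) =====
def Claim_equal_get_determinat : Prop := ∀ (the_matrix : List (List Int)), Dom_get_determinat the_matrix → Pre_get_determinat the_matrix → Spec_get_determinat the_matrix (get_determinat the_matrix)

-- ===== LEMMAS AND PROOFS =====

-- A's inner loop over the columns, characterised: starting from st it multiplies the
-- first component by e r r if column r is in range, and the second by e r (t-r) if
-- column t-r is in range.
theorem inner_loop_char (e : Int → Int → Int) (r t : Int) (k : Nat) (st : Int × Int) :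
    (PySem.List.pyRange 0 (k : Int) 1).foldl
      (fun (st : Int × Int) column =>
        if r + column = t then
          ((if r = column then (st.1 * e r column, st.2) else st).1,
           (if r = column then (st.1 * e r column, st.2) else st).2 * e r column)
        else if r = column then (st.1 * e r column, st.2) else st)
      st
    = (st.1 * (if 0 ≤ r ∧ r < (k : Int) then e r r else 1),
       st.2 * (if 0 ≤ t - r ∧ t - r < (k : Int) then e r (t - r) else 1)) := by
  induction k generalizing st with
  | zero =>
      rw [PySem.List.pyRange_one_eq_nil (by norm_num)]
      simp only [List.foldl_nil]
      rw [if_neg (by omega), if_neg (by omega), mul_one, mul_one]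
  | succ k ih =>
      have hc : ((k + 1 : Nat) : Int) = (k : Int) + 1 := by push_cast; ring
      rw [hc, PySem.List.pyRange_one_succ_right (Int.natCast_nonneg k), List.foldl_append,
        ih, List.foldl_cons, List.foldl_nil]
      split_ifs <;> (try subst_vars) <;> rw [Prod.mk.injEq] <;>
        constructor <;>
        first
          | ring1
          | (exfalso; omega)
          | (simp only [add_sub_cancel_left]; ring1)

-- A fold that multiplies the two components independently splits into two folds.
theorem pair_split (f g : Int → Int) (l : List Int) (a b : Int) :
    l.foldl (fun (st : Int × Int) i => (st.1 * f i, st.2 * g i)) (a, b)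
    = (l.foldl (fun x i => x * f i) a, l.foldl (fun x i => x * g i) b) := by
  induction l generalizing a b with
  | nil => rfl
  | cons x t ih => simp only [List.foldl_cons]; exact ih _ _

theorem foldl_id (l : List Int) (x : Int) : l.foldl (fun a (_ : Int) => a) x = x := by
  induction l generalizing x with
  | nil => rfl
  | cons y t ih => simp only [List.foldl_cons]; exact ih _

-- The conditional main-diagonal product over all rows is the plain product over
-- the clipped range [0, min n m).
theorem main_fold (e : Int → Int) (n m : Int) (hn : 0 ≤ n) (hm : 0 ≤ m) :
    (PySem.List.pyRange 0 n 1).foldl (fun x i => x * (if 0 ≤ i ∧ i < m then e i else 1)) 1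
    = (PySem.List.pyRange 0 (min n m) 1).foldl (fun x i => x * e i) 1 := by
  rw [PySem.List.pyRange_one_append 0 (min n m) n (by omega) (by omega), List.foldl_append]
  have h1 : (PySem.List.pyRange 0 (min n m) 1).foldl
      (fun x i => x * (if 0 ≤ i ∧ i < m then e i else 1)) 1
      = (PySem.List.pyRange 0 (min n m) 1).foldl (fun x i => x * e i) 1 := by
    apply PySem.List.foldl_congr_mem
    intro st i hi
    rw [PySem.List.mem_pyRange_one] at hi
    rw [if_pos (by omega)]
  have h2 : ∀ x : Int, (PySem.List.pyRange (min n m) n 1).foldl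
      (fun x i => x * (if 0 ≤ i ∧ i < m then e i else 1)) x = x := by
    intro x
    have hc : (PySem.List.pyRange (min n m) n 1).foldl
        (fun x i => x * (if 0 ≤ i ∧ i < m then e i else 1)) x
        = (PySem.List.pyRange (min n m) n 1).foldl (fun a (_ : Int) => a) x := by
      apply PySem.List.foldl_congr_mem
      intro st i hi
      rw [PySem.List.mem_pyRange_one] at hi
      rw [if_neg (by omega), mul_one]
    rw [hc, foldl_id]
  rw [h1, h2]

-- The conditional anti-diagonal product over all rows is the plain product over
-- the clipped range [max (n-m) 0, n).
theorem sec_fold (e : Int → Int) (n m : Int) (hn : 0 ≤ n) (hm : 0 ≤ m) :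
    (PySem.List.pyRange 0 n 1).foldl
      (fun x i => x * (if 0 ≤ n - 1 - i ∧ n - 1 - i < m then e i else 1)) 1
    = (PySem.List.pyRange (max (n - m) 0) n 1).foldl (fun x i => x * e i) 1 := by
  rw [PySem.List.pyRange_one_append 0 (max (n - m) 0) n (by omega) (by omega), List.foldl_append]
  have h1 : (PySem.List.pyRange 0 (max (n - m) 0) 1).foldl
      (fun x i => x * (if 0 ≤ n - 1 - i ∧ n - 1 - i < m then e i else 1)) 1 = 1 := by
    have hc : (PySem.List.pyRange 0 (max (n - m) 0) 1).foldl
        (fun x i => x * (if 0 ≤ n - 1 - i ∧ n - 1 - i < m then e i else 1)) 1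
        = (PySem.List.pyRange 0 (max (n - m) 0) 1).foldl (fun a (_ : Int) => a) 1 := by
      apply PySem.List.foldl_congr_mem
      intro st i hi
      rw [PySem.List.mem_pyRange_one] at hi
      rw [if_neg (by omega), mul_one]
    rw [hc, foldl_id]
  have h2 : (PySem.List.pyRange (max (n - m) 0) n 1).foldl
      (fun x i => x * (if 0 ≤ n - 1 - i ∧ n - 1 - i < m then e i else 1)) 1
      = (PySem.List.pyRange (max (n - m) 0) n 1).foldl (fun x i => x * e i) 1 := by
    apply PySem.List.foldl_congr_mem
    intro st i hi
    rw [PySem.List.mem_pyRange_one] at hi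
    rw [if_pos (by omega)]
  rw [h1, h2]

-- A's whole double loop, as a pair of clipped single-loop products.
theorem double_loop_eq (e : Int → Int → Int) (n m : Nat) :
    (PySem.List.pyRange 0 (n : Int) 1).foldl
      (fun (st : Int × Int) row =>
        (PySem.List.pyRange 0 (m : Int) 1).foldl
          (fun (st : Int × Int) column =>
            if row + column = (n : Int) - 1 then
              ((if row = column then (st.1 * e row column, st.2) else st).1,
               (if row = column then (st.1 * e row column, st.2) else st).2 * e row column)
            else if row = column then (st.1 * e row column, st.2) else st)
          st)
      (1, 1)
    = ((PySem.List.pyRange 0 (min (n : Int) (m : Int)) 1).foldl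
         (fun x i => x * e i i) 1,
       (PySem.List.pyRange (max ((n : Int) - (m : Int)) 0) (n : Int) 1).foldl
         (fun x i => x * e i ((n : Int) - 1 - i)) 1) := by
  have hstep : (PySem.List.pyRange 0 (n : Int) 1).foldl
      (fun (st : Int × Int) row =>
        (PySem.List.pyRange 0 (m : Int) 1).foldl
          (fun (st : Int × Int) column =>
            if row + column = (n : Int) - 1 then
              ((if row = column then (st.1 * e row column, st.2) else st).1,
               (if row = column then (st.1 * e row column, st.2) else st).2 * e row column)
            else if row = column then (st.1 * e row column, st.2) else st)
          st)
      (1, 1)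
      = (PySem.List.pyRange 0 (n : Int) 1).foldl
        (fun (st : Int × Int) i =>
          (st.1 * (if 0 ≤ i ∧ i < (m : Int) then e i i else 1),
           st.2 * (if 0 ≤ (n : Int) - 1 - i ∧ (n : Int) - 1 - i < (m : Int)
                   then e i ((n : Int) - 1 - i) else 1)))
        (1, 1) := by
    apply PySem.List.foldl_congr_mem
    intro st i _
    exact inner_loop_char e i ((n : Int) - 1) m st
  rw [hstep,
    pair_split (fun i => if 0 ≤ i ∧ i < (m : Int) then e i i else 1)
      (fun i => if 0 ≤ (n : Int) - 1 - i ∧ (n : Int) - 1 - i < (m : Int)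
                then e i ((n : Int) - 1 - i) else 1),
    main_fold (fun i => e i i) (n : Int) (m : Int) (Int.natCast_nonneg n) (Int.natCast_nonneg m),
    sec_fold (fun i => e i ((n : Int) - 1 - i)) (n : Int) (m : Int)
      (Int.natCast_nonneg n) (Int.natCast_nonneg m)]

theorem ports_agree (M : List (List Int)) : get_determinat M = get_determinat_alt M := by
  by_cases hM : M = []
  · subst hM; decide
  · unfold get_determinat get_determinat_alt
    rw [if_neg hM]
    exact congrArg (fun p : Int × Int => p.1 - p.2)
      (double_loop_eq (fun r c => PySem.List.pyGetD (PySem.List.pyGetD M r []) c 0)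
        M.length (PySem.List.pyGetD M 0 []).length)

-- ===== VERDICT (by name: the statement is the Claim_ definition above) =====
theorem get_determinat_spec : Claim_equal_get_determinat := by
  intro M _ _
  unfold Spec_get_determinat
  exact ports_agree M
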